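-- pv_equiv track=rewrite | github.com/mingyeongho/Algorithm | 백준/Gold/6198. 옥상 정원 꾸미기/옥상 정원 꾸미기.py | solution
-- ===== SOURCE A (Python) =====
-- def solution(N, buildings):
--     answer = 0
--     stk = [] # height
--
--     for height in buildings:
--         while stk and stk[-1] <= height:
--             stk.pop()
--         answer += len(stk)
--         stk.append(height)
--
--     return answer
-- ===== SOURCE B (Python) =====
-- def solution(N, buildings):
--     # Naive forward scan: building i sees each following building while it is
--     # strictly lower; stop at the first one of equal or greater height.
--     answer = 0
--     for i, h in enumerate(buildings):
--         for x in buildings[i + 1:]: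
--             if x >= h:
--                 break
--             answer += 1
--     return answer
-- ===== Notes on version B (the rewrite author's own statement) =====
-- stated objective: simpler
-- what changed: Replaced the monotonic-stack single pass by a direct nested forward scan that counts, for each building, the strictly lower buildings it sees until the first one of equal or greater height.
import Mathlib
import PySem

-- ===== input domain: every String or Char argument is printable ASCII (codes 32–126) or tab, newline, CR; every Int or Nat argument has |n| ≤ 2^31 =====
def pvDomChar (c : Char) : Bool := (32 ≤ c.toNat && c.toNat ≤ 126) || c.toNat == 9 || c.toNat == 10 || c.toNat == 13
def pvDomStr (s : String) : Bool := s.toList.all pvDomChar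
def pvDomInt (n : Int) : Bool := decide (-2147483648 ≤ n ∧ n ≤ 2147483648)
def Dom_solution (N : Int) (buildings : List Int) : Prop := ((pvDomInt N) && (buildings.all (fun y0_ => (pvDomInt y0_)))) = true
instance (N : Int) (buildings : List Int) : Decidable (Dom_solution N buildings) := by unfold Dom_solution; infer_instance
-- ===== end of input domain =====

-- B replaces A's monotonic stack by a plain nested forward scan (simpler, same values).

-- ===== PORT A =====
-- A's inner `while stk and stk[-1] <= height: stk.pop()`; stack top is the list head here.
def popLoop (height : Int) : List Int → List Int
  | [] => []
  | s :: t => if s ≤ height then popLoop height t else s :: t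

def solution (N : Int) (buildings : List Int) : Int :=
  (buildings.foldl
    (fun (st : Int × List Int) height =>
      let stk := popLoop height st.2
      (st.1 + (stk.length : Int), height :: stk))
    (0, [])).1

-- ===== PORT B =====
-- B's inner `for x in buildings[i+1:]: if x >= h: break; answer += 1`
def innerCount (h : Int) : List Int → Int
  | [] => 0
  | x :: t => if x ≥ h then 0 else 1 + innerCount h t

-- B's outer loop: at index i the head is buildings[i] and the tail is buildings[i+1:]
def altGo : List Int → Int
  | [] => 0
  | h :: t => innerCount h t + altGo t

def solution_alt (N : Int) (buildings : List Int) : Int := altGo buildings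

-- ===== PRECONDITION & SPEC =====
def Spec_solution (N : Int) (buildings : List Int) (out : Int) : Prop := out = solution_alt N buildings
instance (N : Int) (buildings : List Int) (out : Int) : Decidable (Spec_solution N buildings out) := by unfold Spec_solution; infer_instance

-- ===== CLAIM (what is proved, stated in full; the proofs are below) =====
def Claim_equal_solution : Prop := ∀ (N : Int) (buildings : List Int), Dom_solution N buildings → Spec_solution N buildings (solution N buildings)

-- ===== LEMMAS AND PROOFS =====

theorem popLoop_sublist (height : Int) (stk : List Int) : (popLoop height stk).Sublist stk := by
  induction stk with
  | nil => simp [popLoop]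
  | cons s t ih =>
    simp only [popLoop]
    split
    · exact ih.trans (List.sublist_cons_self s t)
    · exact List.Sublist.refl _

theorem popLoop_pairwise (height : Int) (stk : List Int) (hp : stk.Pairwise (· < ·)) :
    (popLoop height stk).Pairwise (· < ·) :=
  hp.sublist (popLoop_sublist height stk)

theorem popLoop_gt (height : Int) (stk : List Int) (hp : stk.Pairwise (· < ·)) :
    ∀ x ∈ popLoop height stk, height < x := by
  induction stk with
  | nil => simp [popLoop]
  | cons s t ih =>
    rw [List.pairwise_cons] at hp
    simp only [popLoop]
    split
    · exact ih hp.2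
    · intro x hx
      rcases List.mem_cons.mp hx with rfl | hx
      · omega
      · have := hp.1 x hx; omega

theorem sum_gt (h : Int) (t L : List Int) (hgt : ∀ x ∈ L, h < x) :
    (L.map (fun s => innerCount s (h :: t))).sum
      = (L.length : Int) + (L.map (fun s => innerCount s t)).sum := by
  induction L with
  | nil => simp
  | cons s r ih =>
    have hs : h < s := hgt s (by simp)
    have ih' := ih (fun x hx => hgt x (List.mem_cons_of_mem _ hx))
    rw [List.map_cons, List.sum_cons, List.map_cons, List.sum_cons]
    have h1 : innerCount s (h :: t) = 1 + innerCount s t := by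
      simp only [innerCount]; rw [if_neg (by omega)]
    rw [h1, ih', List.length_cons]
    push_cast
    ring

theorem sum_step (h : Int) (t stk : List Int) (hp : stk.Pairwise (· < ·)) :
    (stk.map (fun s => innerCount s (h :: t))).sum
      = ((popLoop h stk).length : Int)
        + ((popLoop h stk).map (fun s => innerCount s t)).sum := by
  induction stk with
  | nil => simp [popLoop]
  | cons s r ih =>
    rw [List.pairwise_cons] at hp
    simp only [popLoop]
    split
    · rename_i hle
      rw [List.map_cons, List.sum_cons]
      have h0 : innerCount s (h :: t) = 0 := by
        simp only [innerCount]; rw [if_pos (by omega)]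
      rw [h0, ih hp.2]
      ring
    · rename_i hgt
      have hall : ∀ x ∈ s :: r, h < x := by
        intro x hx
        rcases List.mem_cons.mp hx with rfl | hx
        · omega
        · have := hp.1 x hx; omega
      rw [sum_gt h t (s :: r) hall]

theorem fold_invariant (bs : List Int) : ∀ (ans : Int) (stk : List Int),
    stk.Pairwise (· < ·) →
    (bs.foldl
      (fun (st : Int × List Int) height =>
        let stk := popLoop height st.2
        (st.1 + (stk.length : Int), height :: stk))
      (ans, stk)).1
      = ans + (stk.map (fun s => innerCount s bs)).sum + altGo bs := by
  induction bs with
  | nil =>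
    intro ans stk _
    simp [altGo, innerCount]
  | cons h t ih =>
    intro ans stk hp
    have hgt := popLoop_gt h stk hp
    have hp' : (h :: popLoop h stk).Pairwise (· < ·) :=
      List.pairwise_cons.mpr ⟨hgt, popLoop_pairwise h stk hp⟩
    simp only [List.foldl_cons]
    rw [ih _ _ hp']
    simp only [List.map_cons, List.sum_cons, altGo]
    rw [sum_step h t stk hp]
    ring

-- ===== VERDICT (by name: the statement is the Claim_ definition above) =====
theorem solution_spec : Claim_equal_solution := by
  intro N buildings _
  unfold Spec_solution solution solution_alt
  rw [fold_invariant buildings 0 [] (by simp)]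
  simp
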